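-- pv_equiv track=rewrite | github.com/ktomoe/storegate | storegate/storegate.py | _phase_total_events
-- ===== SOURCE A (Python) =====
-- from typing import Any, Literal, TypeVar
--
-- def _phase_total_events(metadata: dict[str, Any], phase: str) -> int | None:
--     phase_events = [data['total_events'] for data in metadata.values()]
--     if len(set(phase_events)) > 1:
--         detail = '\n'.join(
--             f'  {name}: {info["total_events"]} events' for name, info in metadata.items()
--         )
--         raise ValueError(f"Inconsistent event counts in '{phase}' phase:\n{detail}")
--     return phase_events[0] if phase_events else None
-- ===== SOURCE B (Python) =====
-- def _phase_total_events(metadata, phase):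
--     def go(items):
--         # returns the total_events of items[0] (None for []), after checking
--         # the tail recursively; adjacent values are compared, which by
--         # transitivity checks all-equal.
--         if not items:
--             return None
--         (name, data), rest = items[0], items[1:]
--         v = data['total_events']
--         r = go(rest)
--         if r is not None and r != v:
--             detail = '\n'.join(
--                 f'  {n}: {info["total_events"]} events' for n, info in metadata.items()
--             )
--             raise ValueError(f"Inconsistent event counts in '{phase}' phase:\n{detail}")
--         return v
--     return go(list(metadata.items()))
-- ===== Notes on version B (the rewrite author's own statement) =====
-- stated objective: alternative
-- what changed: Replaces the materialised list of all counts plus a set-cardinality test with a structural recursion over the items that returns the head's count and compares it with the recursively checked tail's count (adjacent comparison, all-equal by transitivity), raising the same ValueError on a mismatch and returning None for empty metadata.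
import Mathlib
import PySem

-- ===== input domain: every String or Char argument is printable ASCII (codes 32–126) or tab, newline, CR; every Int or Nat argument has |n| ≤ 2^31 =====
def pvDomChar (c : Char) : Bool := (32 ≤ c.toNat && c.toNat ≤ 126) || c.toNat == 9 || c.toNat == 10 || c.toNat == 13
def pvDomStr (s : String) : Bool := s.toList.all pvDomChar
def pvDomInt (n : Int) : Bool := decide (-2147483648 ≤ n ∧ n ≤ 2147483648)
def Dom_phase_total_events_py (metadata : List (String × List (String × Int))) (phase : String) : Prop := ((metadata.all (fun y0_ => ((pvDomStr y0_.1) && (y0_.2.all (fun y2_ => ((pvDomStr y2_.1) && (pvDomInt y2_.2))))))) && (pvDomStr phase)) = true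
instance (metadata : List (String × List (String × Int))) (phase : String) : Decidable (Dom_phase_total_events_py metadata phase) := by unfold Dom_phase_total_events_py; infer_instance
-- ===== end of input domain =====

-- B replaces A's materialised count list + set-cardinality test by a structural recursion
-- that returns the head's count and checks it against the recursively checked tail
-- (adjacent comparison, all-equal by transitivity); return values agree on Pre_.

-- ===== PORT A =====
-- data['total_events'] (first-match dict lookup; none = KeyError)
def pvGetTE (info : List (String × Int)) : Option Int :=
  (PySem.Dict.mk info).get? "total_events"

-- phase_events = [data['total_events'] for data in metadata.values()]  (none = KeyError inside the comprehension)
def pvPhaseEvents : List (String × List (String × Int)) → Option (List Int)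
  | [] => some []
  | (_, info) :: rest =>
    match pvGetTE info with
    | none => none
    | some v =>
      match pvPhaseEvents rest with
      | none => none
      | some vs => some (v :: vs)

def phase_total_events_py (metadata : List (String × List (String × Int))) (phase : String) : Option Int :=
  match pvPhaseEvents metadata with
  | none => none  -- KeyError (outside Pre_)
  | some evs =>
    if 1 < (PySem.Set.ofList evs).length then
      none  -- ValueError raised (outside Pre_); the detail string is not a return value
    else
      evs.head?  -- phase_events[0] if phase_events else None

-- ===== PORT B =====
-- go(items) of Source B: outer 'some r' = normal return of r (r = None for []),
-- outer none = an exception (KeyError on the lookup, ValueError on a mismatch)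
def pvGo : List (String × List (String × Int)) → Option (Option Int)
  | [] => some none
  | (_, data) :: rest =>
    match (PySem.Dict.mk data).get? "total_events" with
    | none => none  -- KeyError
    | some v =>
      match pvGo rest with
      | none => none  -- exception propagates
      | some r =>
        match r with
        | some rv => if rv ≠ v then none else some (some v)  -- ValueError on mismatch
        | none => some (some v)

def phase_total_events_py_alt (metadata : List (String × List (String × Int))) (phase : String) : Option Int :=
  match pvGo metadata with
  | none => none
  | some r => r

-- ===== PRECONDITION & SPEC =====
-- Pre_ excludes exactly the inputs on which A raises: a value dict missing the
-- 'total_events' key (KeyError) or two entries with different counts (ValueError).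
def Pre_phase_total_events_py (metadata : List (String × List (String × Int))) (phase : String) : Prop :=
  (∀ p ∈ metadata, (pvGetTE p.2).isSome) ∧
  (∀ p ∈ metadata, ∀ q ∈ metadata, pvGetTE p.2 = pvGetTE q.2)

instance (metadata : List (String × List (String × Int))) (phase : String) : Decidable (Pre_phase_total_events_py metadata phase) := by unfold Pre_phase_total_events_py; infer_instance

def pvWitness_phase_total_events_py : (List (String × List (String × Int))) × String :=
  ([("train", [("total_events", 100)]), ("test", [("total_events", 100)])], "train")

def Spec_phase_total_events_py (metadata : List (String × List (String × Int))) (phase : String) (out : Option Int) : Prop := out = phase_total_events_py_alt metadata phase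
instance (metadata : List (String × List (String × Int))) (phase : String) (out : Option Int) : Decidable (Spec_phase_total_events_py metadata phase out) := by unfold Spec_phase_total_events_py; infer_instance

-- ===== CLAIM (what is proved, stated in full; the proofs are below) =====
def Claim_equal_phase_total_events_py : Prop := ∀ (metadata : List (String × List (String × Int))) (phase : String), Dom_phase_total_events_py metadata phase → Pre_phase_total_events_py metadata phase → Spec_phase_total_events_py metadata phase (phase_total_events_py metadata phase)

-- ===== LEMMAS AND PROOFS =====

-- if every entry's count is c, A's comprehension yields a constant list
theorem pvPhaseEvents_const (l : List (String × List (String × Int))) (c : Int)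
    (h : ∀ p ∈ l, pvGetTE p.2 = some c) :
    pvPhaseEvents l = some (List.replicate l.length c) := by
  induction l with
  | nil => rfl
  | cons hd tl ih =>
    have hhd := h hd (List.mem_cons_self ..)
    have htl := ih (fun p hp => h p (List.mem_cons_of_mem _ hp))
    simp [pvPhaseEvents, hhd, htl, List.replicate]

-- a nonempty list of distinct elements all equal to c is [c]
theorem pv_nodup_const (l : List Int) (c : Int) (hnd : l.Nodup)
    (hall : ∀ x ∈ l, x = c) (hne : l ≠ []) : l = [c] := by
  cases l with
  | nil => exact absurd rfl hne
  | cons a t =>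
    have ha : a = c := hall a (List.mem_cons_self ..)
    have ht : t = [] := by
      cases t with
      | nil => rfl
      | cons b u =>
        have hb : b = c := hall b (by simp)
        exact absurd (by simp [ha, hb] : a ∈ b :: u) (List.Nodup.notMem hnd)
    simp [ha, ht]

-- B's recursion returns the head count (none for []) when every count is c
theorem pvGo_const (l : List (String × List (String × Int))) (c : Int)
    (h : ∀ p ∈ l, pvGetTE p.2 = some c) :
    pvGo l = some (if l = [] then none else some c) := by
  induction l with
  | nil => rfl
  | cons hd tl ih =>
    have hhd := h hd (List.mem_cons_self ..)
    have htl := ih (fun p hp => h p (List.mem_cons_of_mem _ hp))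
    unfold pvGo
    rw [show (PySem.Dict.mk hd.2).get? "total_events" = some c from hhd, htl]
    cases tl <;> simp

-- ===== VERDICT (by name: the statement is the Claim_ definition above) =====
theorem phase_total_events_py_spec : Claim_equal_phase_total_events_py := by
  intro metadata phase _ hpre
  obtain ⟨hsome, heq⟩ := hpre
  unfold Spec_phase_total_events_py phase_total_events_py phase_total_events_py_alt
  cases metadata with
  | nil => rfl
  | cons hd tl =>
    obtain ⟨c, hc⟩ := Option.isSome_iff_exists.mp (hsome hd (List.mem_cons_self ..))
    have hall : ∀ p ∈ hd :: tl, pvGetTE p.2 = some c := by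
      intro p hp
      rw [heq p hp hd (List.mem_cons_self ..), hc]
    rw [pvPhaseEvents_const _ c hall, pvGo_const _ c hall]
    have hset : PySem.Set.ofList (c :: List.replicate tl.length c) = [c] := by
      apply pv_nodup_const _ c (PySem.Set.nodup_ofList _)
      · intro x hx
        have hx' := (PySem.Set.mem_ofList _ x).mp hx
        rcases List.mem_cons.mp hx' with h | h
        · exact h
        · exact List.eq_of_mem_replicate h
      · have hmem : c ∈ PySem.Set.ofList (c :: List.replicate tl.length c) :=
          (PySem.Set.mem_ofList _ c).mpr (List.mem_cons_self ..)
        intro hnil; rw [hnil] at hmem; exact absurd hmem (List.not_mem_nil)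
    simp [hset, List.replicate]
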